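-- pv_equiv track=rewrite | github.com/Mars-08042/pesticide-agent | backend/scripts/data_import/recipe_chunks.py | remove_blank_lines
-- ===== SOURCE A (Python) =====
-- from typing import Any, Dict, List, Optional
--
-- def remove_blank_lines(text: str) -> str:
--     """移除文档中的空行（仅移除代码块之外的空行）。
--
--     说明：
--     - 空行指仅包含空白字符的行
--     - fenced code block（```）内的空行保留，避免破坏代码/表格的语义
--     """
--     if not text:
--         return ""
--
--     out: List[str] = []
--     in_fence = False
--
--     for line in text.splitlines():
--         stripped = line.strip()
--         if stripped.startswith("```"):
--             in_fence = not in_fence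
--             out.append(line)
--             continue
--
--         if not in_fence and stripped == "":
--             continue
--
--         out.append(line)
--
--     return "\n".join(out).strip() + "\n"
-- ===== SOURCE B (Python) =====
-- from typing import List, Optional, Tuple
--
-- def _split_at_fence(lines: List[str]) -> Tuple[List[str], Optional[str], List[str]]:
--     """Split off everything before the first fence-marker line."""
--     for i, l in enumerate(lines):
--         if l.strip().startswith("```"):
--             return lines[:i], l, lines[i + 1:]
--     return lines, None, []
--
-- def remove_blank_lines(text: str) -> str:
--     if not text:
--         return ""
--     pieces: List[str] = []
--     inside = False
--     rest = text.splitlines()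
--     while True:
--         seg, marker, rest = _split_at_fence(rest)
--         pieces.extend(seg if inside else [x for x in seg if x.strip() != ""])
--         if marker is None:
--             break
--         pieces.append(marker)
--         inside = not inside
--     return "\n".join(pieces).strip() + "\n"
-- ===== Notes on version B (the rewrite author's own statement) =====
-- stated objective: alternative
-- what changed: Replaced the single line-by-line loop with a per-line in_fence flag by a segment decomposition: repeatedly split off the chunk before the next fence marker and keep it whole (inside a fence) or blank-filtered by a comprehension (outside), toggling the side at each marker.
import Mathlib
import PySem

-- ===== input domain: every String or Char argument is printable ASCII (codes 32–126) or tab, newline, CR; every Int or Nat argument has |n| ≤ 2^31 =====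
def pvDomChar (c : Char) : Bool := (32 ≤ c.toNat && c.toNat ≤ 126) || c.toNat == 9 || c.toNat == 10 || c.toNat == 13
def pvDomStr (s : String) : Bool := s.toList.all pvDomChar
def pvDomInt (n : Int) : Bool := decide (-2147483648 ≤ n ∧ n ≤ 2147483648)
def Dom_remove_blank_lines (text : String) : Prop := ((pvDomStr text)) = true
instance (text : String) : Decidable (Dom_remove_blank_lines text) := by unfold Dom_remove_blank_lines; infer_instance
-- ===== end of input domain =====

-- B removes blank lines outside fenced code blocks by a segment decomposition
-- (split off the chunk before each fence marker, keep it whole inside a fence,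
-- blank-filter it outside) instead of A's per-line flag loop; objective: alternative structure.

-- ===== PORT A =====
def remove_blank_lines (text : String) : String :=
  if text = "" then ""
  else
    let st := (PySem.Str.splitlines text).foldl
      (fun (st : List String × Bool) line =>
        let stripped := PySem.Str.strip line
        if PySem.Str.startswith stripped "```" then (st.1 ++ [line], !st.2)
        else if !st.2 && stripped == "" then st
        else (st.1 ++ [line], st.2)) ([], false)
    PySem.Str.strip (PySem.Str.join "\n" st.1) ++ "\n"

-- ===== PORT B =====
-- helper _split_at_fence: everything before the first fence-marker line, the marker (if any), the rest
def pvSplitAtFence : List String → List String × Option String × List String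
  | [] => ([], none, [])
  | l :: ls =>
    if PySem.Str.startswith (PySem.Str.strip l) "```" then ([], some l, ls)
    else
      let r := pvSplitAtFence ls
      (l :: r.1, r.2.1, r.2.2)

-- termination measure for B's while loop (cited by pvLoop's decreasing_by)
theorem pvSplitAtFence_rest_lt : ∀ (ls seg : List String) (m : String) (rest : List String),
    pvSplitAtFence ls = (seg, some m, rest) → rest.length < ls.length := by
  intro ls
  induction ls with
  | nil => intro seg m rest h; simp [pvSplitAtFence] at h
  | cons l ls ih =>
    intro seg m rest h
    rcases hq : pvSplitAtFence ls with ⟨s2, m2, r2⟩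
    by_cases hc : PySem.Str.startswith (PySem.Str.strip l) "```" = true
    · simp only [pvSplitAtFence, hc, if_true, Prod.mk.injEq] at h
      obtain ⟨-, -, h3⟩ := h; subst h3; simp
    · simp only [pvSplitAtFence, hc, if_false, Bool.false_eq_true, Prod.mk.injEq, hq] at h
      obtain ⟨h1, h2, h3⟩ := h
      subst h3
      have := ih s2 m r2 (by rw [hq, h2])
      simp; omega

-- B's while loop: state (rest, pieces, inside)
def pvLoop (rest pieces : List String) (inside : Bool) : List String :=
  match h : pvSplitAtFence rest with
  | (seg, none, _) =>
      pieces ++ (if inside then seg else seg.filter (fun x => !(PySem.Str.strip x == "")))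
  | (seg, some m, rest') =>
      pvLoop rest'
        (pieces ++ (if inside then seg else seg.filter (fun x => !(PySem.Str.strip x == ""))) ++ [m])
        (!inside)
termination_by rest.length
decreasing_by exact pvSplitAtFence_rest_lt rest seg m rest' h

def remove_blank_lines_alt (text : String) : String :=
  if text = "" then ""
  else
    PySem.Str.strip (PySem.Str.join "\n" (pvLoop (PySem.Str.splitlines text) [] false)) ++ "\n"

-- ===== PRECONDITION & SPEC =====
def Spec_remove_blank_lines (text : String) (out : String) : Prop := out = remove_blank_lines_alt text
instance (text : String) (out : String) : Decidable (Spec_remove_blank_lines text out) := by unfold Spec_remove_blank_lines; infer_instance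

-- ===== CLAIM (what is proved, stated in full; the proofs are below) =====
def Claim_equal_remove_blank_lines : Prop := ∀ (text : String), Dom_remove_blank_lines text → Spec_remove_blank_lines text (remove_blank_lines text)

-- ===== LEMMAS AND PROOFS =====

theorem pvSplitAtFence_cons_marker (l : String) (ls : List String)
    (hc : PySem.Str.startswith (PySem.Str.strip l) "```" = true) :
    pvSplitAtFence (l :: ls) = ([], some l, ls) := by
  rw [pvSplitAtFence, if_pos hc]

theorem pvSplitAtFence_cons_other (l : String) (ls : List String)
    (hc : ¬ PySem.Str.startswith (PySem.Str.strip l) "```" = true) :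
    pvSplitAtFence (l :: ls) =
      (l :: (pvSplitAtFence ls).1, (pvSplitAtFence ls).2.1, (pvSplitAtFence ls).2.2) := by
  rw [pvSplitAtFence, if_neg hc]

theorem pvLoop_eq_none (ls seg r pieces : List String) (inside : Bool)
    (h : pvSplitAtFence ls = (seg, none, r)) :
    pvLoop ls pieces inside =
      pieces ++ (if inside then seg else seg.filter (fun x => !(PySem.Str.strip x == ""))) := by
  rw [pvLoop]
  split
  · next h' => rw [h] at h'; simp at h'; rw [h'.1]
  · next h' => rw [h] at h'; simp at h'

theorem pvLoop_eq_some (ls seg : List String) (m : String) (r pieces : List String) (inside : Bool)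
    (h : pvSplitAtFence ls = (seg, some m, r)) :
    pvLoop ls pieces inside =
      pvLoop r
        (pieces ++ (if inside then seg else seg.filter (fun x => !(PySem.Str.strip x == ""))) ++ [m])
        (!inside) := by
  rw [pvLoop]
  split
  · next h' => rw [h] at h'; simp at h'
  · next h' =>
      rw [h] at h'
      simp only [Prod.mk.injEq, Option.some.injEq] at h'
      obtain ⟨rfl, rfl, rfl⟩ := h'
      rfl

theorem pvLoop_cons (l : String) (ls pieces : List String) (inside : Bool) :
    pvLoop (l :: ls) pieces inside =
      if PySem.Str.startswith (PySem.Str.strip l) "```" then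
        pvLoop ls (pieces ++ [l]) (!inside)
      else if !inside && (PySem.Str.strip l == "") then
        pvLoop ls pieces inside
      else
        pvLoop ls (pieces ++ [l]) inside := by
  by_cases hc : PySem.Str.startswith (PySem.Str.strip l) "```" = true
  · rw [pvLoop_eq_some _ _ _ _ _ _ (pvSplitAtFence_cons_marker l ls hc), if_pos hc]
    simp only [List.filter_nil, ite_self, List.append_nil]
  · rcases hq : pvSplitAtFence ls with ⟨s2, m2, r2⟩
    have h2 : pvSplitAtFence (l :: ls) = (l :: s2, m2, r2) := by
      rw [pvSplitAtFence_cons_other l ls hc, hq]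
    rw [if_neg hc]
    cases m2 with
    | none =>
      rw [pvLoop_eq_none _ _ _ _ _ h2]
      by_cases hb : (!inside && (PySem.Str.strip l == "")) = true
      · rw [if_pos hb, pvLoop_eq_none _ _ _ _ _ hq]
        have hins : inside = false := by cases inside <;> simp_all
        have hsl : (PySem.Str.strip l == "") = true := by cases inside <;> simp_all
        simp [hins, List.filter_cons, hsl]
      · rw [if_neg hb, pvLoop_eq_none _ _ _ _ _ hq]
        cases inside with
        | true => simp
        | false =>
          have hsl : (PySem.Str.strip l == "") = false := by
            cases h3 : (PySem.Str.strip l == "") <;> simp_all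
          simp [List.filter_cons, hsl]
    | some m =>
      rw [pvLoop_eq_some _ _ _ _ _ _ h2]
      by_cases hb : (!inside && (PySem.Str.strip l == "")) = true
      · rw [if_pos hb, pvLoop_eq_some _ _ _ _ _ _ hq]
        have hins : inside = false := by cases inside <;> simp_all
        have hsl : (PySem.Str.strip l == "") = true := by cases inside <;> simp_all
        simp [hins, List.filter_cons, hsl]
      · rw [if_neg hb, pvLoop_eq_some _ _ _ _ _ _ hq]
        cases inside with
        | true => simp
        | false =>
          have hsl : (PySem.Str.strip l == "") = false := by
            cases h3 : (PySem.Str.strip l == "") <;> simp_all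
          simp [List.filter_cons, hsl]

theorem foldl_eq_pvLoop (ls pieces : List String) (inside : Bool) :
    (ls.foldl (fun (st : List String × Bool) line =>
        let stripped := PySem.Str.strip line
        if PySem.Str.startswith stripped "```" then (st.1 ++ [line], !st.2)
        else if !st.2 && stripped == "" then st
        else (st.1 ++ [line], st.2)) (pieces, inside)).1 = pvLoop ls pieces inside := by
  induction ls generalizing pieces inside with
  | nil => simp [pvLoop, pvSplitAtFence]
  | cons l ls ih =>
    rw [List.foldl_cons, pvLoop_cons]
    by_cases hm : PySem.Str.startswith (PySem.Str.strip l) "```" = true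
    · simp only [hm, if_true]
      exact ih (pieces ++ [l]) (!inside)
    · by_cases hb : (!inside && (PySem.Str.strip l == "")) = true
      · simp only [hm, Bool.false_eq_true, if_false, hb, if_true]
        exact ih pieces inside
      · simp only [hm, hb, Bool.false_eq_true, if_false]
        exact ih (pieces ++ [l]) inside

-- ===== VERDICT (by name: the statement is the Claim_ definition above) =====
theorem remove_blank_lines_spec : Claim_equal_remove_blank_lines := by
  intro text _
  unfold Spec_remove_blank_lines remove_blank_lines remove_blank_lines_alt
  by_cases h : text = ""
  · simp [h]
  · simp only [h, if_false]
    rw [foldl_eq_pvLoop]
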